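-- pv_equiv track=rewrite | github.com/XmchxUp/Kata | codewars/7kyu/Is There an Odd Bit?/Is There an Odd Bit?.py | any_odd
-- ===== SOURCE A (Python) =====
-- def any_odd(x):
--     # Write code here...
--
--     flag = False
--     while x > 0:
--         if flag and x & 1 == 1:
--             return True
--         x = x // 2
--         flag = not flag
--     return False
-- ===== SOURCE B (Python) =====
-- def any_odd(x):
--     # Recurse two bits at a time: test bit 1, then drop the pair.
--     if x <= 1:
--         return False
--     return (x >> 1) & 1 == 1 or any_odd(x >> 2)
-- ===== Notes on version B (the rewrite author's own statement) =====
-- stated objective: alternative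
-- what changed: Replaces A's while-loop over single halvings with an alternating boolean flag by a direct recursion that inspects bit 1 and drops two bits per step, with no flag state.
import Mathlib
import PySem

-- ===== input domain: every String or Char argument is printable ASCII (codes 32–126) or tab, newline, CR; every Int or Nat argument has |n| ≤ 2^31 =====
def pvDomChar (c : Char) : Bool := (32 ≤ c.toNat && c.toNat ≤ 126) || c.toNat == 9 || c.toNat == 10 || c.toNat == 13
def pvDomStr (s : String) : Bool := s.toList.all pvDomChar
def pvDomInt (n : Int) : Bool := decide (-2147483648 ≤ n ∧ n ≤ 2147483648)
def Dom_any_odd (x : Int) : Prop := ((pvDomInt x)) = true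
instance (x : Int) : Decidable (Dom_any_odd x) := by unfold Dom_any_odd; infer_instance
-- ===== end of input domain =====

-- B replaces A's flag-alternating halving loop by a direct recursion two bits at a time (alternative, same cost).

-- ===== PORT A =====
-- the while loop: state (x, flag); 'x // 2' is Python floor division
def anyOddAux (x : Int) (flag : Bool) : Bool :=
  if 0 < x then
    if flag && (PySem.Int.band x 1 == 1) then true
    else anyOddAux (PySem.Int.floordiv x 2) (!flag)
  else false
termination_by x.toNat
decreasing_by
  rw [PySem.Int.floordiv_eq_ediv_of_pos (by omega : (0:Int) < 2)]; omega

def any_odd (x : Int) : Bool := anyOddAux x false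

-- ===== PORT B =====
-- Python's 'n >> k' on int is exactly Lean's 'n >>> k' (floor shift)
def any_odd_alt (x : Int) : Bool :=
  if x ≤ 1 then false
  else (PySem.Int.band (x >>> (1:Nat)) 1 == 1) || any_odd_alt (x >>> (2:Nat))
termination_by x.toNat
decreasing_by
  rw [Int.shiftRight_eq_div_pow]; norm_num; omega

-- ===== PRECONDITION & SPEC =====
def Spec_any_odd (x : Int) (out : Bool) : Prop := out = any_odd_alt x
instance (x : Int) (out : Bool) : Decidable (Spec_any_odd x out) := by unfold Spec_any_odd; infer_instance

-- ===== CLAIM (what is proved, stated in full; the proofs are below) =====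
def Claim_equal_any_odd : Prop := ∀ (x : Int), Dom_any_odd x → Spec_any_odd x (any_odd x)

-- ===== LEMMAS AND PROOFS =====

lemma anyOddAux_nonpos (x : Int) (flag : Bool) (h : ¬ 0 < x) : anyOddAux x flag = false := by
  rw [anyOddAux]; simp [h]

lemma key : ∀ (n : Nat) (x : Int), x.toNat ≤ n → anyOddAux x false = any_odd_alt x := by
  intro n
  induction n with
  | zero =>
    intro x hx
    rw [anyOddAux, any_odd_alt]
    simp only [Bool.false_and]
    have h0 : ¬ 0 < x := by omega
    simp [h0, show x ≤ 1 by omega]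
  | succ n ih =>
    intro x hx
    by_cases hpos : 0 < x
    · by_cases hone : x = 1
      · subst hone
        rw [anyOddAux, any_odd_alt]
        have : PySem.Int.floordiv 1 2 = 0 := by
          rw [PySem.Int.floordiv_eq_ediv_of_pos (by omega : (0:Int) < 2)]; decide
        rw [this]
        simp [anyOddAux_nonpos]
      · -- x ≥ 2
        have h2 : 2 ≤ x := by omega
        have hd2 : PySem.Int.floordiv x 2 = x / 2 :=
          PySem.Int.floordiv_eq_ediv_of_pos (by omega)
        have hd4 : PySem.Int.floordiv (x / 2) 2 = x / 2 / 2 :=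
          PySem.Int.floordiv_eq_ediv_of_pos (by omega)
        have hs1 : x >>> (1:Nat) = x / 2 := by
          rw [Int.shiftRight_eq_div_pow]; norm_num
        have hs2 : x >>> (2:Nat) = x / 2 / 2 := by
          rw [Int.shiftRight_eq_div_pow]; norm_num; omega
        have hhalfpos : 0 < x / 2 := by omega
        rw [anyOddAux]
        simp only [hpos, if_true, Bool.false_and, Bool.not_false, hd2]
        rw [anyOddAux]
        simp only [hhalfpos, if_true, Bool.true_and, hd4]
        rw [any_odd_alt]
        simp only [show ¬ x ≤ 1 by omega, if_false, hs1, hs2]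
        have hih : anyOddAux (x / 2 / 2) false = any_odd_alt (x / 2 / 2) :=
          ih (x / 2 / 2) (by omega)
        by_cases hb : PySem.Int.band (x / 2) 1 == 1
        · simp [hb]
        · simp [hb, hih]
    · rw [anyOddAux_nonpos x false hpos, any_odd_alt]
      simp [show x ≤ 1 by omega]

-- ===== VERDICT (by name: the statement is the Claim_ definition above) =====
theorem any_odd_spec : Claim_equal_any_odd := by
  intro x _
  unfold Spec_any_odd any_odd
  exact key x.toNat x le_rfl
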